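-- pv_equiv track=rewrite | github.com/GuramiPapunashvili/GOA-hackhaton-V7 | hackaton problems/solution 10/python.py | addAndSubtract
-- ===== SOURCE A (Python) =====
-- def addAndSubtract(str):
--     num = 0
--     res = []
--     for i in str:
--         if i == '+':
--             num += 1
--             res.append(num)
--         elif i == '-':
--             num -= 1
--             res.append(num)
--     return res
-- ===== SOURCE B (Python) =====
-- def addAndSubtract(str):
--     # Back-to-front: compute the final total once, then walk the string in
--     # reverse, emitting the running total and undoing each step; reverse at end.
--     total = str.count('+') - str.count('-')
--     out = []
--     for c in reversed(str):
--         if c == '+':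
--             out.append(total)
--             total -= 1
--         elif c == '-':
--             out.append(total)
--             total += 1
--     out.reverse()
--     return out
-- ===== Notes on version B (the rewrite author's own statement) =====
-- stated objective: alternative
-- what changed: Instead of a forward running-sum loop, B computes the final total once via str.count and then builds the output back-to-front: a reverse scan that emits the current total and undoes each step, reversing the result at the end.
import Mathlib
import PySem

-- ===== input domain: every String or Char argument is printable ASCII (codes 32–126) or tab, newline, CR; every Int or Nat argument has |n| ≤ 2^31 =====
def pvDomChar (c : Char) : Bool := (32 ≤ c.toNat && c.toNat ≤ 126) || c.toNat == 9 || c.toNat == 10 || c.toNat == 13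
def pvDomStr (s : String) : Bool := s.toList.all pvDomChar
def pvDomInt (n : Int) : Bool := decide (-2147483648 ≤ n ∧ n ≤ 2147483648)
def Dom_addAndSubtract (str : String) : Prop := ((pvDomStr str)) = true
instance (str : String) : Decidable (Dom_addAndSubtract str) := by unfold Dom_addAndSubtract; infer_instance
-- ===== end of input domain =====

-- B builds the output back-to-front: final total via str.count, then a reverse scan undoing each step (alternative strategy; same cost).

-- ===== PORT A =====
-- fused forward loop: state (num, res), appending the running count at each sign character
def addAndSubtract (str : String) : List Int :=
  (str.toList.foldl (fun (st : Int × List Int) i =>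
     if i = '+' then (st.1 + 1, st.2 ++ [st.1 + 1])
     else if i = '-' then (st.1 - 1, st.2 ++ [st.1 - 1])
     else st) (0, [])).2

-- ===== PORT B =====
-- total = str.count('+') - str.count('-'); reverse scan emits total then undoes the step; out.reverse() at the end
def addAndSubtract_alt (str : String) : List Int :=
  let total : Int := (PySem.Str.count str "+" : Int) - (PySem.Str.count str "-" : Int)
  let st := str.toList.reverse.foldl (fun (st : Int × List Int) c =>
      if c = '+' then (st.1 - 1, st.2 ++ [st.1])
      else if c = '-' then (st.1 + 1, st.2 ++ [st.1])
      else st) (total, ([] : List Int))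
  st.2.reverse

-- ===== PRECONDITION & SPEC =====
def Spec_addAndSubtract (str : String) (out : List Int) : Prop := out = addAndSubtract_alt str
instance (str : String) (out : List Int) : Decidable (Spec_addAndSubtract str out) := by unfold Spec_addAndSubtract; infer_instance

-- ===== CLAIM (what is proved, stated in full; the proofs are below) =====
def Claim_equal_addAndSubtract : Prop := ∀ (str : String), Dom_addAndSubtract str → Spec_addAndSubtract str (addAndSubtract str)

-- ===== LEMMAS AND PROOFS =====

-- step deltas of the sign characters, and prefix sums (the common reference value)
def pvDeltas (l : List Char) : List Int :=
  (l.filter (fun c => c = '+' ∨ c = '-')).map (fun c => if c = '+' then (1 : Int) else -1)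

def pvAccum (a : Int) : List Int → List Int
  | [] => []
  | d :: ds => (a + d) :: pvAccum (a + d) ds

-- A's fused loop produces the prefix sums of the deltas
theorem pv_fold_accum (l : List Char) (num : Int) (res : List Int) :
    (l.foldl (fun (st : Int × List Int) i =>
       if i = '+' then (st.1 + 1, st.2 ++ [st.1 + 1])
       else if i = '-' then (st.1 - 1, st.2 ++ [st.1 - 1])
       else st) (num, res)).2
    = res ++ pvAccum num (pvDeltas l) := by
  induction l generalizing num res with
  | nil => simp [pvAccum, pvDeltas]
  | cons c t ih =>
    by_cases h1 : c = '+'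
    · simp [h1, pvDeltas, List.filter, pvAccum]
      have := ih (num + 1) (res ++ [num + 1])
      simp [pvDeltas] at this
      simpa using this
    · by_cases h2 : c = '-'
      · simp [h1, h2, pvDeltas, List.filter, pvAccum]
        have := ih (num - 1) (res ++ [num - 1])
        simp [pvDeltas, sub_eq_add_neg] at this
        simpa [sub_eq_add_neg] using this
      · simp [h1, h2, pvDeltas, List.filter]
        have := ih num res
        simpa [pvDeltas] using this

-- B's reverse fold: the accumulator list only ever grows on the right
theorem pv_revfold_state (r : List Char) (t : Int) (res : List Int) :
    r.foldl (fun (st : Int × List Int) c =>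
      if c = '+' then (st.1 - 1, st.2 ++ [st.1])
      else if c = '-' then (st.1 + 1, st.2 ++ [st.1])
      else st) (t, res)
    = ((r.foldl (fun (st : Int × List Int) c =>
      if c = '+' then (st.1 - 1, st.2 ++ [st.1])
      else if c = '-' then (st.1 + 1, st.2 ++ [st.1])
      else st) (t, [])).1,
       res ++ (r.foldl (fun (st : Int × List Int) c =>
      if c = '+' then (st.1 - 1, st.2 ++ [st.1])
      else if c = '-' then (st.1 + 1, st.2 ++ [st.1])
      else st) (t, [])).2) := by
  induction r generalizing t res with
  | nil => simp
  | cons c r ih =>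
    by_cases h1 : c = '+'
    · simp only [List.foldl_cons, if_pos h1, List.nil_append]
      rw [ih (t-1) (res ++ [t]), ih (t-1) [t]]
      simp
    · by_cases h2 : c = '-'
      · simp only [List.foldl_cons, if_neg h1, if_pos h2, List.nil_append]
        rw [ih (t+1) (res ++ [t]), ih (t+1) [t]]
        simp
      · simp only [List.foldl_cons, if_neg h1, if_neg h2]
        exact ih t res

theorem pv_accum_append (a d : Int) (ds : List Int) :
    pvAccum a (ds ++ [d]) = pvAccum a ds ++ [a + ds.sum + d] := by
  induction ds generalizing a with
  | nil => simp [pvAccum]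
  | cons x xs ih => simp [pvAccum, ih (a + x)]; ring_nf

theorem pv_deltas_append (l : List Char) (c : Char) :
    pvDeltas (l ++ [c]) =
      pvDeltas l ++ (if c = '+' then [(1 : Int)] else if c = '-' then [(-1 : Int)] else []) := by
  by_cases h1 : c = '+' <;> by_cases h2 : c = '-' <;>
    simp_all [pvDeltas, List.filter_append]

-- B's reverse scan, started at a + sum of deltas, reproduces the prefix sums from a
theorem pv_rev_char (l : List Char) (a : Int) :
    ((l.reverse.foldl (fun (st : Int × List Int) c =>
      if c = '+' then (st.1 - 1, st.2 ++ [st.1])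
      else if c = '-' then (st.1 + 1, st.2 ++ [st.1])
      else st) (a + (pvDeltas l).sum, [])).2).reverse = pvAccum a (pvDeltas l) := by
  induction l using List.reverseRecOn generalizing a with
  | nil => simp [pvDeltas, pvAccum]
  | append_singleton l c ih =>
    rw [pv_deltas_append]
    by_cases h1 : c = '+'
    · subst h1
      simp only [List.reverse_append, List.reverse_singleton, List.singleton_append,
        List.foldl_cons, List.sum_append, List.sum_cons, List.sum_nil, List.nil_append,
        Char.reduceEq, reduceIte]
      rw [pv_revfold_state, pv_accum_append]
      have h : a + ((pvDeltas l).sum + (1 + 0)) - 1 = a + (pvDeltas l).sum := by ring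
      rw [h]
      simp only [List.nil_append, List.reverse_append, List.reverse_singleton]
      rw [ih a]
      simp
      ring_nf
    · by_cases h2 : c = '-'
      · subst h2
        simp only [List.reverse_append, List.reverse_singleton, List.singleton_append,
          List.foldl_cons, List.sum_append, List.sum_cons, List.sum_nil, List.nil_append,
          Char.reduceEq, reduceIte]
        rw [pv_revfold_state, pv_accum_append]
        have h : a + ((pvDeltas l).sum + (-1 + 0)) + 1 = a + (pvDeltas l).sum := by ring
        rw [h]
        simp only [List.nil_append, List.reverse_append, List.reverse_singleton]
        rw [ih a]
        simp
        ring_nf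
      · simp only [List.reverse_append, List.reverse_singleton, List.singleton_append,
          List.foldl_cons, List.sum_append, List.sum_nil, if_neg h1, if_neg h2, List.append_nil]
        simpa using ih a

-- PySem.Chars.count with a single-character needle is List.count
theorem pv_go_single (c : Char) : ∀ (cs : List Char) (fuel acc : Nat), cs.length ≤ fuel →
    PySem.Chars.count.go [c] fuel cs acc = acc + cs.count c := by
  intro cs
  induction cs with
  | nil => intro fuel acc h; cases fuel <;> simp [PySem.Chars.count.go]
  | cons h t ih =>
    intro fuel acc hle
    cases fuel with
    | zero => simp at hle
    | succ f =>
      have hf : t.length ≤ f := by simpa using hle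
      by_cases hc : c = h
      · subst hc
        simp [PySem.Chars.count.go, List.isPrefixOf, ih f (acc + 1) hf]
        omega
      · simp [PySem.Chars.count.go, List.isPrefixOf, hc, ih f acc hf, List.count_cons]
        simp [Ne.symm hc]

theorem pv_count_single (cs : List Char) (c : Char) :
    PySem.Chars.count cs [c] = cs.count c := by
  simp [PySem.Chars.count, pv_go_single c cs cs.length 0 le_rfl]

-- the final total equals the sum of the deltas
theorem pv_sum_deltas (l : List Char) :
    (l.count '+' : Int) - (l.count '-' : Int) = (pvDeltas l).sum := by
  induction l with
  | nil => simp [pvDeltas]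
  | cons c t ih =>
    by_cases h1 : c = '+'
    · simp [h1, pvDeltas, List.filter, List.count_cons] at *
      omega
    · by_cases h2 : c = '-'
      · simp [h2, pvDeltas, List.filter, List.count_cons] at *
        omega
      · have h1' : ('+' : Char) ≠ c := Ne.symm h1
        have h2' : ('-' : Char) ≠ c := Ne.symm h2
        simp [pvDeltas, List.filter, h1, h2, h1', h2', List.count_cons]
        simpa [pvDeltas] using ih

-- ===== VERDICT (by name: the statement is the Claim_ definition above) =====
theorem addAndSubtract_spec : Claim_equal_addAndSubtract := by
  intro s _
  unfold Spec_addAndSubtract addAndSubtract addAndSubtract_alt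
  have hplus : ("+" : String).toList = ['+'] := by decide
  have hminus : ("-" : String).toList = ['-'] := by decide
  rw [PySem.Str.count_eq, PySem.Str.count_eq, hplus, hminus, pv_count_single, pv_count_single]
  have htot : (s.toList.count '+' : Int) - (s.toList.count '-' : Int)
      = (0 : Int) + (pvDeltas s.toList).sum := by
    rw [pv_sum_deltas]; ring
  simp only [htot]
  rw [pv_rev_char s.toList 0]
  simpa [pvDeltas] using pv_fold_accum s.toList 0 []
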